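-- pv_equiv track=rewrite | github.com/liet-codes/groovy-commutator-research | experiments/exp5_equivalence_table.py | reflect_rule
-- ===== SOURCE A (Python) =====
-- def reflect_rule(rule):
--     """Reflect a rule (swap left and right neighbors)."""
--     new_rule = 0
--     for i in range(8):
--         L = (i >> 2) & 1
--         C_val = (i >> 1) & 1
--         R = i & 1
--         reflected_i = (R << 2) | (C_val << 1) | L
--         bit = (rule >> i) & 1
--         new_rule |= (bit << reflected_i)
--     return new_rule
-- ===== SOURCE B (Python) =====
-- def reflect_rule(rule):
--     """Reflect a rule (swap left and right neighbors) via two XOR bit-swaps."""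
--     r = rule % 256
--     d = ((r >> 1) ^ (r >> 4)) & 1
--     r ^= (d << 1) | (d << 4)
--     d = ((r >> 3) ^ (r >> 6)) & 1
--     r ^= (d << 3) | (d << 6)
--     return r
-- ===== Notes on version B (the rewrite author's own statement) =====
-- stated objective: simpler
-- what changed: Replaced the 8-iteration loop that re-derives each neighborhood index and scatters bits one by one with a loop-free computation: reduce the rule mod 256 and swap bit pairs (1,4) and (3,6) with the XOR trick; bits 0,2,5,7 are fixed points of the reflection.
import Mathlib
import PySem

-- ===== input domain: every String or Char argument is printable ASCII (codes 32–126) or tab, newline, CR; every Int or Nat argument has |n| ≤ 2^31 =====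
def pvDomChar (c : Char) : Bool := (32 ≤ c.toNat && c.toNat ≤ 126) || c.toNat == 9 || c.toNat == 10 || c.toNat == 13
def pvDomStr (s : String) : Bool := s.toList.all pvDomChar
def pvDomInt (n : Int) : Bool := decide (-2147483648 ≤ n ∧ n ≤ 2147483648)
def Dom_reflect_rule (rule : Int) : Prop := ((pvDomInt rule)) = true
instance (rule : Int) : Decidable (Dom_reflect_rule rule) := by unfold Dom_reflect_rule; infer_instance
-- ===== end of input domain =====

-- B replaces A's 8-iteration bit-scatter loop by a loop-free mask + two XOR bit-swaps (simpler, constant work).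

-- ===== PORT A =====
def reflect_rule (rule : Int) : Int :=
  (PySem.List.pyRange 0 8 1).foldl (fun (new_rule : Int) (i : Int) =>
    let L := PySem.Int.band (i >>> (2:Nat)) 1
    let C_val := PySem.Int.band (i >>> (1:Nat)) 1
    let R := PySem.Int.band i 1
    let reflected_i := PySem.Int.bor (PySem.Int.bor (R <<< (2:Nat)) (C_val <<< (1:Nat))) L
    let bit := PySem.Int.band (rule >>> i.toNat) 1
    PySem.Int.bor new_rule (bit <<< reflected_i.toNat)) 0

-- ===== PORT B =====
def reflect_rule_alt (rule : Int) : Int :=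
  let r0 := PySem.Int.mod rule 256
  let d1 := PySem.Int.band (PySem.Int.bxor (r0 >>> (1:Nat)) (r0 >>> (4:Nat))) 1
  let r1 := PySem.Int.bxor r0 (PySem.Int.bor (d1 <<< (1:Nat)) (d1 <<< (4:Nat)))
  let d2 := PySem.Int.band (PySem.Int.bxor (r1 >>> (3:Nat)) (r1 >>> (6:Nat))) 1
  PySem.Int.bxor r1 (PySem.Int.bor (d2 <<< (3:Nat)) (d2 <<< (6:Nat)))

-- ===== PRECONDITION & SPEC =====
def Spec_reflect_rule (rule : Int) (out : Int) : Prop := out = reflect_rule_alt rule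
instance (rule : Int) (out : Int) : Decidable (Spec_reflect_rule rule out) := by unfold Spec_reflect_rule; infer_instance

-- ===== CLAIM (what is proved, stated in full; the proofs are below) =====
def Claim_equal_reflect_rule : Prop := ∀ (rule : Int), Dom_reflect_rule rule → Spec_reflect_rule rule (reflect_rule rule)

-- ===== LEMMAS AND PROOFS =====

-- bit k of a (k < 8) only depends on a % 256
lemma bit_mod (a : Int) (k : Nat) (hk : k ≤ 7) :
    PySem.Int.band (a >>> k) 1 = PySem.Int.band ((a % 256) >>> k) 1 := by
  rw [PySem.Int.band_one, PySem.Int.band_one,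
      PySem.Int.mod_eq_emod_of_pos (by norm_num), PySem.Int.mod_eq_emod_of_pos (by norm_num),
      Int.shiftRight_eq_div_pow, Int.shiftRight_eq_div_pow]
  interval_cases k <;> push_cast <;> omega

-- A depends on rule only through rule % 256
lemma A_mod (rule : Int) : reflect_rule rule = reflect_rule (rule % 256) := by
  have h : PySem.List.pyRange 0 8 1 = [0,1,2,3,4,5,6,7] := by decide
  simp only [reflect_rule, h, List.foldl]
  rw [show ((0:Int).toNat) = 0 from rfl, show ((1:Int).toNat) = 1 from rfl,
      show ((2:Int).toNat) = 2 from rfl, show ((3:Int).toNat) = 3 from rfl,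
      show ((4:Int).toNat) = 4 from rfl, show ((5:Int).toNat) = 5 from rfl,
      show ((6:Int).toNat) = 6 from rfl, show ((7:Int).toNat) = 7 from rfl,
      bit_mod rule 0 (by norm_num), bit_mod rule 1 (by norm_num),
      bit_mod rule 2 (by norm_num), bit_mod rule 3 (by norm_num),
      bit_mod rule 4 (by norm_num), bit_mod rule 5 (by norm_num),
      bit_mod rule 6 (by norm_num), bit_mod rule 7 (by norm_num)]

-- B depends on rule only through rule % 256
lemma B_mod (rule : Int) : reflect_rule_alt rule = reflect_rule_alt (rule % 256) := by
  simp only [reflect_rule_alt]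
  rw [show PySem.Int.mod (rule % 256) 256 = PySem.Int.mod rule 256 by
        rw [PySem.Int.mod_eq_emod_of_pos (by norm_num), PySem.Int.mod_eq_emod_of_pos (by norm_num)]
        omega]

-- A = B on the 256 residues
set_option maxRecDepth 4096 in
lemma agree_small : ∀ n : Fin 256, reflect_rule ((n : Nat) : Int) = reflect_rule_alt ((n : Nat) : Int) := by
  decide

-- ===== VERDICT (by name: the statement is the Claim_ definition above) =====
theorem reflect_rule_spec : Claim_equal_reflect_rule := by
  intro rule _
  unfold Spec_reflect_rule
  rw [A_mod, B_mod]
  have h0 : 0 ≤ rule % 256 := Int.emod_nonneg _ (by norm_num)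
  have h1 : rule % 256 < 256 := Int.emod_lt_of_pos _ (by norm_num)
  have hr : rule % 256 = (((rule % 256).toNat : Nat) : Int) := by omega
  rw [hr]
  exact agree_small ⟨(rule % 256).toNat, by omega⟩
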